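-- pv_equiv track=rewrite | github.com/YzySSS/stock-analysis | src/notification.py | _split_content_by_sections
-- ===== SOURCE A (Python) =====
-- def _split_content_by_sections(content: str) -> list:
--     """按章节分割内容"""
--     sections = []
--     lines = content.split('\n')
--     current_title = ""
--     current_content = []
--
--     for line in lines:
--         if line.startswith('## '):
--             if current_content:
--                 sections.append((current_title, '\n'.join(current_content)))
--             current_title = line.replace('## ', '').strip()
--             current_content = [line]
--         else:
--             current_content.append(line)
--
--     if current_content:
--         sections.append((current_title, '\n'.join(current_content)))
--
--     return sections
-- ===== SOURCE B (Python) =====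
-- def _split_content_by_sections(content: str) -> list:
--     """按章节分割内容 — recursive take-next-chunk decomposition instead of an accumulating loop"""
--     lines = content.split('\n')
--
--     def body_of(ls):
--         # longest prefix of non-header lines
--         out = []
--         for l in ls:
--             if l.startswith('## '):
--                 break
--             out.append(l)
--         return out
--
--     def go(ls):
--         # ls is empty or starts with a header line
--         if not ls:
--             return []
--         head, rest = ls[0], ls[1:]
--         body = body_of(rest)
--         title = head.replace('## ', '').strip()
--         return [(title, '\n'.join([head] + body))] + go(rest[len(body):])
--
--     pre = body_of(lines)
--     if pre:
--         return [("", '\n'.join(pre))] + go(lines[len(pre):])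
--     return go(lines)
-- ===== Notes on version B (the rewrite author's own statement) =====
-- stated objective: alternative
-- what changed: Replaced A's single accumulating state-machine loop (sections/current_title/current_content mutable state) with a recursive take-next-chunk decomposition: grab the longest non-header prefix as the preamble, then repeatedly emit (title, header+following body) and recurse past that chunk.
import Mathlib
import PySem

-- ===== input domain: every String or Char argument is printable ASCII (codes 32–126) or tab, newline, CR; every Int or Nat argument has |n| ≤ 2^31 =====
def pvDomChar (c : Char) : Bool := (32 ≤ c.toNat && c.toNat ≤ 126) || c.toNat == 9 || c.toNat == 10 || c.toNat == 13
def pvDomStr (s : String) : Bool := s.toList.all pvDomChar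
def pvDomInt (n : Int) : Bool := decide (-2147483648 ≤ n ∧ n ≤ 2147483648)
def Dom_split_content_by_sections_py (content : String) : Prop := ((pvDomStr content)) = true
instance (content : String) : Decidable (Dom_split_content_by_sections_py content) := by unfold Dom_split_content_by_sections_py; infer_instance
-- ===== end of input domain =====

-- B replaces A's accumulating state-machine loop by a recursive take-next-chunk decomposition (alternative structure, same cost).

-- ===== PORT A =====
-- one step of A's for-loop: state = (sections, current_title, current_content)
def pvStepA (st : List (String × String) × String × List String) (line : String) :
    List (String × String) × String × List String :=
  let (secs, t, cur) := st
  if PySem.Str.startswith line "## " then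
    let secs' := if cur ≠ [] then secs ++ [(t, PySem.Str.join "\n" cur)] else secs
    (secs', PySem.Str.strip (PySem.Str.replace line "## " ""), [line])
  else
    (secs, t, cur ++ [line])

-- A's trailing 'if current_content: sections.append(…)'
def pvFinishA (st : List (String × String) × String × List String) : List (String × String) :=
  let (secs, t, cur) := st
  if cur ≠ [] then secs ++ [(t, PySem.Str.join "\n" cur)] else secs

def split_content_by_sections_py (content : String) : List (String × String) :=
  let lines := (PySem.Str.split? content "\n").getD []   -- sep "\n" ≠ "", so split? is always some
  pvFinishA (lines.foldl pvStepA ([], "", []))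

-- ===== PORT B =====
-- body_of in Source B: longest prefix of non-header lines (the for-loop with break)
def pvBodyOf : List String → List String
  | [] => []
  | l :: r => if PySem.Str.startswith l "## " then [] else l :: pvBodyOf r

-- go in Source B: ls is empty or starts with a header line; emit its chunk, recurse past it
def pvGo : List String → List (String × String)
  | [] => []
  | head :: rest =>
      let body := pvBodyOf rest
      (PySem.Str.strip (PySem.Str.replace head "## " ""),
        PySem.Str.join "\n" (head :: body)) :: pvGo (rest.drop body.length)
termination_by ls => ls.length
decreasing_by simp [List.length_drop]

def split_content_by_sections_py_alt (content : String) : List (String × String) :=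
  let lines := (PySem.Str.split? content "\n").getD []   -- sep "\n" ≠ "", so split? is always some
  let pre := pvBodyOf lines
  if pre ≠ [] then
    ("", PySem.Str.join "\n" pre) :: pvGo (lines.drop pre.length)
  else
    pvGo lines

-- ===== PRECONDITION & SPEC =====
def Spec_split_content_by_sections_py (content : String) (out : List (String × String)) : Prop := out = split_content_by_sections_py_alt content
instance (content : String) (out : List (String × String)) : Decidable (Spec_split_content_by_sections_py content out) := by unfold Spec_split_content_by_sections_py; infer_instance

-- ===== CLAIM (what is proved, stated in full; the proofs are below) =====
def Claim_equal_split_content_by_sections_py : Prop := ∀ (content : String), Dom_split_content_by_sections_py content → Spec_split_content_by_sections_py content (split_content_by_sections_py content)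

-- ===== LEMMAS AND PROOFS =====

theorem pvGo_nil : pvGo [] = [] := by simp [pvGo]

theorem pvGo_cons (head : String) (rest : List String) :
    pvGo (head :: rest) =
      (PySem.Str.strip (PySem.Str.replace head "## " ""),
        PySem.Str.join "\n" (head :: pvBodyOf rest)) :: pvGo (rest.drop (pvBodyOf rest).length) := by
  simp [pvGo]

-- loop invariant: with a nonempty current chunk, finishing A's fold from (secs, t, cur) over ls
-- appends the current section (extended by the following body) and then B's go over the remainder.
theorem pvFoldA_eq (ls : List String) : ∀ (secs : List (String × String)) (t : String)
    (cur : List String), cur ≠ [] →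
    pvFinishA (ls.foldl pvStepA (secs, t, cur)) =
      secs ++ (t, PySem.Str.join "\n" (cur ++ pvBodyOf ls)) :: pvGo (ls.drop (pvBodyOf ls).length) := by
  induction ls with
  | nil =>
      intro secs t cur hcur
      simp [pvFinishA, pvBodyOf, pvGo_nil, hcur]
  | cons l r ih =>
      intro secs t cur hcur
      by_cases hl : PySem.Str.startswith l "## " = true
      · have hl' : PySem.Chars.startswith l.toList ['#', '#', ' '] = true := by simpa using hl
        have step : pvStepA (secs, t, cur) l =
            (secs ++ [(t, PySem.Str.join "\n" cur)],
              PySem.Str.strip (PySem.Str.replace l "## " ""), [l]) := by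
          simp [pvStepA, hl', hcur]
        have hbody : pvBodyOf (l :: r) = [] := by simp [pvBodyOf, hl']
        rw [List.foldl_cons, step, ih _ _ [l] (by simp), hbody]
        simp [pvGo_cons]
      · have hl' : PySem.Chars.startswith l.toList ['#', '#', ' '] = false := by simpa using hl
        have step : pvStepA (secs, t, cur) l = (secs, t, cur ++ [l]) := by
          simp [pvStepA, hl']
        have hbody : pvBodyOf (l :: r) = l :: pvBodyOf r := by simp [pvBodyOf, hl']
        rw [List.foldl_cons, step, ih _ _ (cur ++ [l]) (by simp), hbody]
        simp

theorem split_content_by_sections_py_spec : Claim_equal_split_content_by_sections_py := by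
  intro content _
  unfold Spec_split_content_by_sections_py
  unfold split_content_by_sections_py split_content_by_sections_py_alt
  cases hls : (PySem.Str.split? content "\n").getD [] with
  | nil => simp [pvFinishA, pvBodyOf, pvGo_nil]
  | cons l r =>
      by_cases hl : PySem.Str.startswith l "## " = true
      · have hl' : PySem.Chars.startswith l.toList ['#', '#', ' '] = true := by simpa using hl
        have step : pvStepA ([], "", []) l =
            ([], PySem.Str.strip (PySem.Str.replace l "## " ""), [l]) := by
          simp [pvStepA, hl']
        have hbody : pvBodyOf (l :: r) = [] := by simp [pvBodyOf, hl']
        simp only [List.foldl_cons, step, hbody,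
          pvFoldA_eq r [] (PySem.Str.strip (PySem.Str.replace l "## " "")) [l] (by simp)]
        simp [pvGo_cons]
      · have hl' : PySem.Chars.startswith l.toList ['#', '#', ' '] = false := by simpa using hl
        have step : pvStepA ([], "", []) l = ([], "", [l]) := by
          simp [pvStepA, hl']
        have hbody : pvBodyOf (l :: r) = l :: pvBodyOf r := by simp [pvBodyOf, hl']
        simp only [List.foldl_cons, step, hbody, pvFoldA_eq r [] "" [l] (by simp)]
        simp
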